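-- pv_equiv track=rewrite | github.com/pjm4github/GraphVIZPy | gvpy/engines/layout/twopi/circle.py | is_leaf
-- ===== SOURCE A (Python) =====
-- def is_leaf(name: str, adj: dict[str, list[str]]) -> bool:
--     """Return True if ``name`` has at most one distinct neighbour
--     (excluding self-loops).
--
--     Mirrors ``circle.c::isLeaf`` (line 55).  A node with all
--     duplicate neighbours (multiedges to the same node) is still a
--     leaf.
--     """
--     distinct = None
--     for v in adj.get(name, ()):
--         if v == name:
--             continue
--         if distinct is None:
--             distinct = v
--         elif distinct != v:
--             return False
--     return True
-- ===== SOURCE B (Python) =====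
-- def is_leaf(name: str, adj: dict[str, list[str]]) -> bool:
--     """Return True if ``name`` has at most one distinct neighbour
--     (excluding self-loops)."""
--     return len({v for v in adj.get(name, ()) if v != name}) <= 1
-- ===== Notes on version B (the rewrite author's own statement) =====
-- stated objective: simpler
-- what changed: Replaces the first-distinct sentinel with early return by building the set of distinct non-self neighbours in one comprehension and testing its cardinality.
import Mathlib
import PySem

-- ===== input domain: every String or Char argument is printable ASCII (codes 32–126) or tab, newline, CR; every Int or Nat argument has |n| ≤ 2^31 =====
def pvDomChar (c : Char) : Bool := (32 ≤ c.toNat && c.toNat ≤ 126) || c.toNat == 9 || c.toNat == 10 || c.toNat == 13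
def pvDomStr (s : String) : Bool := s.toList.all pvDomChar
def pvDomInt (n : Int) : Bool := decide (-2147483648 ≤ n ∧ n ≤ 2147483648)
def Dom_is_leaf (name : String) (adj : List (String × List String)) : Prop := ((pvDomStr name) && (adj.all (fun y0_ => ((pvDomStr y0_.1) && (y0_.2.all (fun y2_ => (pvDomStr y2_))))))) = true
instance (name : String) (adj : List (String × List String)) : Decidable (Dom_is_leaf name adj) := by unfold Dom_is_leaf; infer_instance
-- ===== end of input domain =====

-- B is a simpler build-then-count reformulation: one set comprehension of the distinct
-- non-self neighbours, then a cardinality test; no sentinel, no early return.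

-- ===== PORT A =====
-- the 'for v in adj.get(name, ())' loop with the 'distinct' sentinel and early 'return False'
def isLeafLoopA (name : String) (distinct : Option String) : List String → Bool
  | [] => true
  | v :: rest =>
    if v == name then isLeafLoopA name distinct rest
    else
      match distinct with
      | none => isLeafLoopA name (some v) rest
      | some d => if d != v then false else isLeafLoopA name distinct rest

def is_leaf (name : String) (adj : List (String × List String)) : Bool :=
  isLeafLoopA name none ((PySem.Dict.mk adj).getD name [])

-- ===== PORT B =====
def is_leaf_alt (name : String) (adj : List (String × List String)) : Bool :=
  decide ((PySem.Set.ofList (((PySem.Dict.mk adj).getD name []).filter (fun v => !(v == name)))).length ≤ 1)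

-- ===== PRECONDITION & SPEC =====
def Spec_is_leaf (name : String) (adj : List (String × List String)) (out : Bool) : Prop := out = is_leaf_alt name adj
instance (name : String) (adj : List (String × List String)) (out : Bool) : Decidable (Spec_is_leaf name adj out) := by unfold Spec_is_leaf; infer_instance

-- ===== CLAIM (what is proved, stated in full; the proofs are below) =====
def Claim_equal_is_leaf : Prop := ∀ (name : String) (adj : List (String × List String)), Dom_is_leaf name adj → Spec_is_leaf name adj (is_leaf name adj)

-- ===== LEMMAS AND PROOFS =====

-- with the sentinel set to d, the loop just checks every further non-self neighbour equals d
lemma loopA_some (name d : String) (l : List String) :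
    isLeafLoopA name (some d) l = (l.filter (fun v => !(v == name))).all (fun v => v == d) := by
  induction l with
  | nil => simp [isLeafLoopA]
  | cons v rest ih =>
    by_cases hv : (v == name) = true
    · simpa [isLeafLoopA, hv, List.filter_cons] using ih
    · by_cases hd : d = v
      · subst hd
        simp [isLeafLoopA, hv, List.filter_cons, ih]
      · have h1 : (d != v) = true := bne_iff_ne.mpr hd
        have h2 : (v == d) = false := beq_eq_false_iff_ne.mpr (Ne.symm hd)
        simp [isLeafLoopA, hv, List.filter_cons, h1, h2]

lemma set_cons_card_le_one (v : String) (l : List String) :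
    ((PySem.Set.ofList (v :: l)).length ≤ 1) ↔ ∀ x ∈ l, x = v := by
  rw [PySem.Set.ofList_cons]
  have key : ((PySem.Set.ofList l).discard v = []) ↔ ∀ x ∈ l, x = v := by
    rw [List.eq_nil_iff_forall_not_mem]
    constructor
    · intro h x hx
      by_contra hne
      exact h x ((PySem.Set.mem_discard _ _ _).mpr ⟨(PySem.Set.mem_ofList _ _).mpr hx, hne⟩)
    · intro h x hx
      rcases (PySem.Set.mem_discard _ _ _).mp hx with ⟨hm, hne⟩
      exact hne (h x ((PySem.Set.mem_ofList _ _).mp hm))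
  rw [← key, List.length_cons, ← List.length_eq_zero_iff]
  omega

lemma loopA_none (name : String) (l : List String) :
    isLeafLoopA name none l =
      decide ((PySem.Set.ofList (l.filter (fun v => !(v == name)))).length ≤ 1) := by
  induction l with
  | nil => simp [isLeafLoopA]
  | cons v rest ih =>
    by_cases hv : (v == name) = true
    · simpa [isLeafLoopA, hv, List.filter_cons] using ih
    · have hf : List.filter (fun v => !(v == name)) (v :: rest)
          = v :: List.filter (fun v => !(v == name)) rest := by
        simp [List.filter_cons, hv]
      have hA : isLeafLoopA name none (v :: rest) = isLeafLoopA name (some v) rest := by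
        simp [isLeafLoopA, hv]
      rw [hf, hA, loopA_some, Bool.eq_iff_iff]
      simp only [decide_eq_true_eq, List.all_eq_true, beq_iff_eq]
      exact (set_cons_card_le_one v _).symm

-- ===== VERDICT (by name: the statement is the Claim_ definition above) =====
theorem is_leaf_spec : Claim_equal_is_leaf := by
  intro name adj _
  unfold Spec_is_leaf is_leaf is_leaf_alt
  exact loopA_none name ((PySem.Dict.mk adj).getD name [])
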